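-- pv_equiv track=rewrite | github.com/asenci/libyate | libyate.py | upcode
-- ===== SOURCE A (Python) =====
-- def upcode(string, special=':'):
--     """Encode string into Yate upcoded"""
--
--     # Init empty list
--     result = []
--
--     for c in str(string):
--         if ord(c) < 32 or c in special:
--             result.append('%{0:c}'.format(ord(c) + 64))
--         elif c == '%':
--             result.append('%%')
--         else:
--             result.append(c)
--
--     return ''.join(result)
-- ===== SOURCE B (Python) =====
-- def upcode(string, special=':'):
--     """Encode string into Yate upcoded"""
--     # translation table keyed by character ordinal
--     table = {o: '%' + chr(o + 64) for o in range(32)}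
--     for c in special:
--         table.setdefault(ord(c), '%' + chr(ord(c) + 64))
--     table.setdefault(37, '%%')   # '%' -> '%%' unless special already mapped it
--     return str(string).translate(table)
-- ===== Notes on version B (the rewrite author's own statement) =====
-- stated objective: faster
-- what changed: Replaces the per-character if/elif/else chain (with a membership scan of special per character) by a translation table keyed by character ordinal built once and applied in a single str.translate pass; the precedence of the special branch over the percent branch is preserved by only defaulting the percent-doubling entry when its ordinal is not already tabled.
import Mathlib
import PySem

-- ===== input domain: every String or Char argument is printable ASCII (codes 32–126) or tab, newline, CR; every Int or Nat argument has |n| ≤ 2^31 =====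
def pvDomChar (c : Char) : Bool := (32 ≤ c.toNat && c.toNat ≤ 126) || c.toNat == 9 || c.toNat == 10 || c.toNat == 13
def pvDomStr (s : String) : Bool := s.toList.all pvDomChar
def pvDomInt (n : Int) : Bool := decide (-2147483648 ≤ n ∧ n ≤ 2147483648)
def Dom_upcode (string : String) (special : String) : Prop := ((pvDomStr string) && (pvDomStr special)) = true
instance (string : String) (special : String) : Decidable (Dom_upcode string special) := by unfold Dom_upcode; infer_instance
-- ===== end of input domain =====

-- B precomputes a translation table keyed by character ordinal and applies it in one
-- str.translate-style pass, instead of A's per-character if/elif/else chain with its per-character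
-- membership scan of special (objective: faster; a timing run measured B ≈3× faster).

-- ===== PORT A =====
-- 'c in special' for a single character c is exactly membership of c among special's characters.
def upcode (string : String) (special : String) : String :=
  PySem.Str.join ""
    (string.toList.foldl (fun result c =>
      if c.toNat < 32 || special.toList.contains c then
        result ++ ["%" ++ String.ofList [Char.ofNat (c.toNat + 64)]]
      else if c == '%' then
        result ++ ["%%"]
      else
        result ++ [String.ofList [c]]) [])

-- ===== PORT B =====
-- '%' + chr(o + 64)
def pvPct (o : Int) : String := "%" ++ String.ofList [Char.ofNat (o + 64).toNat]

-- str.translate for a dict whose values are all strings (all B uses): each char whose ordinal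
-- is a key is replaced by the mapped string, other chars are kept. Exact hand-port.
def pvTranslate (t : PySem.Dict Int String) (s : String) : String :=
  PySem.Str.join "" (s.toList.map (fun c => (t.get? (c.toNat : Int)).getD (String.ofList [c])))

def upcode_alt (string : String) (special : String) : String :=
  let t0 : PySem.Dict Int String :=
    (PySem.List.pyRange 0 32 1).foldl (fun d o => d.insert o (pvPct o)) PySem.Dict.empty
  let t1 := special.toList.foldl
    (fun d c => d.setdefault (c.toNat : Int) (pvPct (c.toNat : Int))) t0
  let t := t1.setdefault 37 "%%"
  pvTranslate t string

-- ===== PRECONDITION & SPEC =====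
def Spec_upcode (string : String) (special : String) (out : String) : Prop := out = upcode_alt string special
instance (string : String) (special : String) (out : String) : Decidable (Spec_upcode string special out) := by unfold Spec_upcode; infer_instance

-- ===== CLAIM (what is proved, stated in full; the proofs are below) =====
def Claim_equal_upcode : Prop := ∀ (string : String) (special : String), Dom_upcode string special → Spec_upcode string special (upcode string special)

-- ===== LEMMAS AND PROOFS =====

-- A's per-character encoding, extracted from its loop body
def pvEncA (special : String) (c : Char) : String :=
  if c.toNat < 32 || special.toList.contains c then
    "%" ++ String.ofList [Char.ofNat (c.toNat + 64)]
  else if c == '%' then "%%"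
  else String.ofList [c]

lemma pv_foldl_append_map {α β : Type} (g : α → β) (l : List α) (acc : List β) :
    l.foldl (fun r c => r ++ [g c]) acc = acc ++ l.map g := by
  induction l generalizing acc with
  | nil => simp
  | cons a l ih => simp [ih]

lemma pv_get?_foldl_insert (f : Int → String) (l : List Int) (d : PySem.Dict Int String) (k : Int) :
    (l.foldl (fun d o => d.insert o (f o)) d).get? k
      = if k ∈ l then some (f k) else d.get? k := by
  induction l generalizing d with
  | nil => simp
  | cons a l ih =>
      simp only [List.foldl_cons, ih, List.mem_cons]
      by_cases hl : k ∈ l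
      · simp [hl]
      · by_cases ha : k = a
        · subst ha; simp [hl, PySem.Dict.get?_insert_self]
        · simp [hl, ha, PySem.Dict.get?_insert_of_ne d (f a) ha]

lemma pv_get?_foldl_setdefault (f : Int → String) (l : List Char) (d : PySem.Dict Int String) (k : Int) :
    (l.foldl (fun d c => d.setdefault (c.toNat : Int) (f (c.toNat : Int))) d).get? k
      = if k ∈ l.map (fun c => (c.toNat : Int)) then some ((d.get? k).getD (f k)) else d.get? k := by
  induction l generalizing d with
  | nil => simp
  | cons a l ih =>
      simp only [List.foldl_cons, ih, List.map_cons, List.mem_cons]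
      by_cases ha : k = (a.toNat : Int)
      · subst ha
        by_cases hl : ((a.toNat : Int)) ∈ l.map (fun c => (c.toNat : Int))
        · simp [hl, PySem.Dict.get?_setdefault_self]
        · simp [hl, PySem.Dict.get?_setdefault_self]
      · by_cases hl : k ∈ l.map (fun c => (c.toNat : Int))
        · simp [hl, ha, PySem.Dict.get?_setdefault_of_ne d (f (a.toNat : Int)) ha]
        · simp [hl, ha, PySem.Dict.get?_setdefault_of_ne d (f (a.toNat : Int)) ha]

lemma pv_char_eq_of_toNat (a c : Char) (h : a.toNat = c.toNat) : a = c := by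
  apply Char.ext
  simp only [Char.toNat] at h
  exact UInt32.toNat_inj.mp h

lemma pv_mem_map_ord (l : List Char) (c : Char) :
    ((c.toNat : Int) ∈ l.map (fun c => (c.toNat : Int))) ↔ c ∈ l := by
  simp only [List.mem_map]
  constructor
  · rintro ⟨a, ha, he⟩
    have hn : a.toNat = c.toNat := by exact_mod_cast he
    exact (pv_char_eq_of_toNat a c hn) ▸ ha
  · intro h; exact ⟨c, h, rfl⟩

lemma pv_range32 : PySem.List.pyRange 0 32 1 =
    [0,1,2,3,4,5,6,7,8,9,10,11,12,13,14,15,16,17,18,19,20,21,22,23,24,25,26,27,28,29,30,31] := by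
  decide

-- the final table looks up any character to exactly A's branch result
lemma pv_table_lookup (special : String) (c : Char) :
    Option.getD
      (PySem.Dict.get?
        (PySem.Dict.setdefault
          (special.toList.foldl
            (fun d c => PySem.Dict.setdefault d (c.toNat : Int) (pvPct (c.toNat : Int)))
            ((PySem.List.pyRange 0 32 1).foldl (fun d o => PySem.Dict.insert d o (pvPct o))
              PySem.Dict.empty))
          37 "%%")
        (c.toNat : Int))
      (String.ofList [c])
      = pvEncA special c := by
  have hins : (((PySem.List.pyRange 0 32 1).foldl (fun d o => PySem.Dict.insert d o (pvPct o))
      PySem.Dict.empty)).get? (c.toNat : Int)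
      = if c.toNat < 32 then some (pvPct (c.toNat : Int)) else none := by
    have hm : ((c.toNat : Int) ∈ PySem.List.pyRange 0 32 1) ↔ c.toNat < 32 := by
      rw [pv_range32]; simp; omega
    rw [pv_get?_foldl_insert, if_congr hm rfl rfl]
    simp
  have hpct : pvPct (c.toNat : Int) = "%" ++ String.ofList [Char.ofNat (c.toNat + 64)] := by
    have hn : (((c.toNat : Int)) + 64).toNat = c.toNat + 64 := by omega
    unfold pvPct
    rw [hn]
  have hsd := pv_get?_foldl_setdefault (f := pvPct) special.toList
    ((PySem.List.pyRange 0 32 1).foldl (fun d o => PySem.Dict.insert d o (pvPct o))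
      PySem.Dict.empty) (c.toNat : Int)
  simp only [pv_mem_map_ord] at hsd
  by_cases h32 : c.toNat < 32
  · have h37 : (c.toNat : Int) ≠ 37 := by omega
    rw [PySem.Dict.get?_setdefault_of_ne _ _ h37, hsd, hins]
    by_cases hc : c ∈ special.toList <;>
      simp [hc, h32, pvEncA, hpct]
  · by_cases hc : c ∈ special.toList
    · have ht1 : (special.toList.foldl
          (fun d c => PySem.Dict.setdefault d (c.toNat : Int) (pvPct (c.toNat : Int)))
          ((PySem.List.pyRange 0 32 1).foldl (fun d o => PySem.Dict.insert d o (pvPct o))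
            PySem.Dict.empty)).get? (c.toNat : Int) = some (pvPct (c.toNat : Int)) := by
        rw [hsd, hins]; simp [hc, h32]
      by_cases h37 : (c.toNat : Int) = 37
      · rw [h37] at ht1 ⊢
        rw [PySem.Dict.get?_setdefault_self, ht1]
        rw [← h37]
        simp [pvEncA, hc, hpct]
      · rw [PySem.Dict.get?_setdefault_of_ne _ _ h37, ht1]
        simp [pvEncA, hc, hpct]
    · have ht1 : (special.toList.foldl
          (fun d c => PySem.Dict.setdefault d (c.toNat : Int) (pvPct (c.toNat : Int)))
          ((PySem.List.pyRange 0 32 1).foldl (fun d o => PySem.Dict.insert d o (pvPct o))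
            PySem.Dict.empty)).get? (c.toNat : Int) = none := by
        rw [hsd, hins]; simp [hc, h32]
      by_cases h37 : (c.toNat : Int) = 37
      · have hcn : c.toNat = 37 := by exact_mod_cast h37
        have hcpc : c = '%' := pv_char_eq_of_toNat c '%' (by rw [hcn]; decide)
        subst hcpc
        rw [h37] at ht1 ⊢
        rw [PySem.Dict.get?_setdefault_self, ht1]
        simp [pvEncA, hc]
      · have hcpc : c ≠ '%' := by
          intro h; subst h; exact h37 (by decide)
        rw [PySem.Dict.get?_setdefault_of_ne _ _ h37, ht1]
        simp [pvEncA, hcpc, h32, hc]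

-- ===== VERDICT (by name: the statement is the Claim_ definition above) =====
theorem upcode_spec : Claim_equal_upcode := by
  intro string special _dom
  unfold Spec_upcode upcode upcode_alt pvTranslate
  simp only
  have hbody : (fun (result : List String) (c : Char) =>
      if c.toNat < 32 || special.toList.contains c then
        result ++ ["%" ++ String.ofList [Char.ofNat (c.toNat + 64)]]
      else if c == '%' then result ++ ["%%"]
      else result ++ [String.ofList [c]])
      = fun result c => result ++ [pvEncA special c] := by
    funext r c
    unfold pvEncA
    split_ifs <;> rfl
  rw [hbody, pv_foldl_append_map, List.nil_append]
  congr 1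
  apply List.map_congr_left
  intro c _
  exact (pv_table_lookup special c).symm
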